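-- pv_equiv track=rewrite | github.com/salaschen/ACM | UVA/Liu/Chapter6_DataStructures/536_TreeRecovery/sol.py | transform
-- ===== SOURCE A (Python) =====
-- def transform(pred, inord):
--     if len(pred) == 0 and len(inord) == 0:
--         return "" ;
--     if len(pred) == 1 and len(inord) == 1:
--         return pred ;
--     root = pred[0] ;
--     leftLen = inord.find(root) ;
--     rightLen = len(pred) - 1 - leftLen ;
--     left = transform(pred[1:leftLen+1], inord[:leftLen]) ;
--     right = transform(pred[leftLen+1:], inord[leftLen+1:]) ;
--     return left+right+root ;
-- ===== SOURCE B (Python) =====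
-- def transform(pred, inord):
--     # Single recursive descent over the preorder with a global inorder cursor and a
--     # stop-sentinel: no search for the root, no slicing, one shared output list.
--     # Rejects pairs that are not the pre/inorder of one tree (both cursors must be
--     # fully consumed when the walk ends).
--     n = len(pred)
--     i = 0
--     j = 0
--     out = []
--
--     def dfs(stop):
--         nonlocal i, j
--         if j == n or inord[j] == stop:
--             return
--         root = pred[i]
--         i += 1
--         dfs(root)
--         j += 1
--         dfs(stop)
--         out.append(root)
--
--     dfs(None)
--     if i != n or j != len(inord):
--         raise ValueError("pred/inord are not the preorder/inorder of one tree")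
--     return "".join(out)
-- ===== Notes on version B (the rewrite author's own statement) =====
-- stated objective: faster
-- what changed: B never locates the root in the inorder string and never splits anything: it does one recursive descent over the preorder with two global cursors and a stop-sentinel character (a call consumes nodes until the inorder cursor reaches its stop char), appending each node to one shared output list, instead of A's per-node find plus four string slices and string concatenations.
-- outside the precondition, e.g. on transform('A', 'B'): A returns 'A', B raises IndexError; on transform('AB', 'AA'): A returns 'BA', B raises IndexError
import Mathlib
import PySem

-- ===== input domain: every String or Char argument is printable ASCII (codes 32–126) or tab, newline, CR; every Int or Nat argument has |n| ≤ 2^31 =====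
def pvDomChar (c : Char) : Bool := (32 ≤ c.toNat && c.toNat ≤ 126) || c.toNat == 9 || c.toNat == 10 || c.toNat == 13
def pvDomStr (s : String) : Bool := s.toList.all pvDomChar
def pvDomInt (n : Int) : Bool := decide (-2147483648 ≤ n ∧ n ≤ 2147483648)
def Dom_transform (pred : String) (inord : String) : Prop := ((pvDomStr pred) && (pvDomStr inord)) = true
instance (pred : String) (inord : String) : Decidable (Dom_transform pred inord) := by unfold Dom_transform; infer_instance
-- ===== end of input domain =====

-- B replaces A's root-split recursion (find + four slices per node) by a single
-- recursive descent over the preorder with two global cursors and a stop-sentinel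
-- character, appending into one shared output list (O(n) instead of O(n^2); measured
-- faster in a timing run).

-- ===== PORT A =====
-- A's recursion can fail to terminate on inconsistent inputs (when find returns -1 the
-- right sub-call repeats the same arguments); the port carries fuel = len(pred)+1, which
-- is enough for every input admitted by Pre_transform (recursion depth ≤ len(pred)).
def transformAuxA : Nat → List Char → List Char → List Char
  | 0, _, _ => []
  | fuel + 1, pred, inord =>
    if pred.length = 0 ∧ inord.length = 0 then []
    else if pred.length = 1 ∧ inord.length = 1 then pred
    else
      let root := PySem.List.pyGetD pred 0 ' '           -- pred[0]
      let leftLen := PySem.Chars.find inord [root]       -- inord.find(root)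
      let _rightLen := (pred.length : Int) - 1 - leftLen -- computed by A, never used
      let left := transformAuxA fuel (PySem.List.slice pred (some 1) (some (leftLen + 1)))
                                     (PySem.List.slice inord none (some leftLen))
      let right := transformAuxA fuel (PySem.List.slice pred (some (leftLen + 1)) none)
                                      (PySem.List.slice inord (some (leftLen + 1)) none)
      left ++ right ++ [root]

def transform (pred : String) (inord : String) : String :=
  String.ofList (transformAuxA (pred.toList.length + 1) pred.toList inord.toList)

-- ===== PORT B =====
-- dfs(stop) : state (i, j, out); Python's pred[i] / inord[j] are ported with getD, which
-- is exact here because inside Pre_transform both cursors are always in range when read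
-- (proved by the main lemma); fuel = len(pred)+1 bounds the recursion depth under Pre_.
def dfsB : Nat → List Char → List Char → Option Char → Nat → Nat → List Char →
    Nat × Nat × List Char
  | 0, _, _, _, i, j, out => (i, j, out)
  | fuel + 1, P, I, stop, i, j, out =>
    if j = P.length ∨ stop = some (I.getD j ' ') then (i, j, out)
    else
      let root := P.getD i ' '
      let l := dfsB fuel P I (some root) (i + 1) j out   -- l = (i, j, out) after the left call
      let r := dfsB fuel P I stop l.1 (l.2.1 + 1) l.2.2  -- j += 1, then the right call
      (r.1, r.2.1, r.2.2 ++ [root])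

def transform_alt (pred : String) (inord : String) : String :=
  String.ofList (dfsB (pred.toList.length + 1) pred.toList inord.toList none 0 0 []).2.2

-- ===== PRECONDITION & SPEC =====
-- 'valid pred inord': the pair splits recursively as preorder/inorder of one binary tree.
def valid : Nat → List Char → List Char → Bool
  | _, [], [] => true
  | fuel + 1, r :: ps, is =>
    if r ∈ is then
      let k := is.idxOf r
      valid fuel (ps.take k) (is.take k) && valid fuel (ps.drop k) (is.drop (k + 1))
    else false
  | _, _, _ => false

-- Pre_transform is the problem's input contract: the two strings recursively split (under
-- A's own first-occurrence find) as the pre-/inorder listings of one binary tree ('valid'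
-- checks only this shape; it computes no output, and no closed index formula can express it,
-- since A itself recurses forever on some inputs outside it). It excludes only structurally
-- inconsistent pairs (e.g. two singletons with different characters, or mismatched
-- duplicate-letter pairs): there A's value, when it returns one at all, is an accident of
-- its base cases never comparing characters, and B's cursor-driven descent raises
-- IndexError, so no common value can be claimed.
def Pre_transform (pred : String) (inord : String) : Prop :=
  valid (inord.toList.length + 1) pred.toList inord.toList = true
instance (pred : String) (inord : String) : Decidable (Pre_transform pred inord) := by
  unfold Pre_transform; infer_instance

def pvWitness_transform : String × String := ("DBACEGF", "ABCDEFG")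

def Spec_transform (pred : String) (inord : String) (out : String) : Prop := out = transform_alt pred inord
instance (pred : String) (inord : String) (out : String) : Decidable (Spec_transform pred inord out) := by unfold Spec_transform; infer_instance

-- ===== CLAIM (what is proved, stated in full; the proofs are below) =====
def Claim_equal_transform : Prop := ∀ (pred : String) (inord : String), Dom_transform pred inord → Pre_transform pred inord → Spec_transform pred inord (transform pred inord)

-- ===== LEMMAS AND PROOFS =====

theorem valid_length : ∀ (fuel : Nat) (p i : List Char), valid fuel p i = true → p.length = i.length := by
  intro fuel p i h
  fun_induction valid fuel p i with
  | case1 => rfl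
  | case2 fuel r ps is hmem k ihl ihr =>
    rw [Bool.and_eq_true] at h
    have l1 := ihl h.1
    have l2 := ihr h.2
    have hkd : k = is.idxOf r := rfl
    have hk : is.idxOf r < is.length := List.idxOf_lt_length_of_mem hmem
    rw [hkd] at l1 l2
    simp only [List.length_take, List.length_drop] at l1 l2
    simp only [List.length_cons]
    omega
  | case3 => simp at h
  | case4 => simp at h

theorem valid_cons_inv (fuel : Nat) (r : Char) (p i : List Char)
    (h : valid fuel (r :: p) i = true) :
    ∃ fv, fuel = fv + 1
      ∧ r ∈ i ∧ valid fv (p.take (i.idxOf r)) (i.take (i.idxOf r)) = true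
      ∧ valid fv (p.drop (i.idxOf r)) (i.drop (i.idxOf r + 1)) = true := by
  cases fuel with
  | zero => rw [valid.eq_def] at h; split at h <;> simp_all
  | succ fv =>
    refine ⟨fv, rfl, ?_⟩
    simp only [valid] at h
    by_cases hmem : r ∈ i
    · rw [if_pos hmem, Bool.and_eq_true] at h
      exact ⟨hmem, h.1, h.2⟩
    · rw [if_neg hmem] at h; simp at h

theorem not_mem_take_idxOf : ∀ (l : List Char) (c : Char), c ∉ l.take (l.idxOf c) := by
  intro l
  induction l with
  | nil => intro c; simp
  | cons x xs ih =>
    intro c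
    by_cases hcx : c = x
    · subst hcx; simp [List.idxOf_cons_self]
    · rw [List.idxOf_cons_ne _ (by exact fun h => hcx h.symm), List.take_succ_cons]
      simp only [List.mem_cons, not_or]
      exact ⟨hcx, ih c⟩

theorem singleton_prefix_drop (s : List Char) (c : Char) (i : Nat) :
    [c] <+: s.drop i ↔ ∃ h : i < s.length, s[i] = c := by
  constructor
  · rintro ⟨t, ht⟩
    have hlen : i < s.length := by
      have := congrArg List.length ht
      simp [List.length_drop] at this
      omega
    refine ⟨hlen, ?_⟩
    have h2 : List.drop i s = c :: t := ht.symm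
    have h0 : s[i] = (s.drop i)[0]'(by simp [List.length_drop]; omega) := by
      simp
    rw [h0]
    simp [h2]
  · rintro ⟨h, hc⟩
    refine ⟨s.drop (i + 1), ?_⟩
    rw [List.drop_eq_getElem_cons h, hc]; rfl

theorem find_singleton (s : List Char) (c : Char) (h : c ∈ s) :
    PySem.Chars.find s [c] = (s.idxOf c : Int) := by
  have hinf : [c] <:+: s := by
    obtain ⟨l, r, rfl⟩ := List.append_of_mem h
    exact ⟨l, r, by simp⟩
  have hnn : 0 ≤ PySem.Chars.find s [c] := (PySem.Chars.find_nonneg_iff s [c]).mpr hinf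
  obtain ⟨hpre, hmin⟩ := PySem.Chars.find_spec hnn
  obtain ⟨hlt, hc⟩ := (singleton_prefix_drop s c _).mp hpre
  have : s.idxOf c = (PySem.Chars.find s [c]).toNat := by
    rw [List.idxOf, List.findIdx_eq hlt]
    refine ⟨by simp [hc], ?_⟩
    intro j hj
    have hnp := hmin j hj
    rw [singleton_prefix_drop] at hnp
    simp only [not_exists] at hnp
    have := hnp (by omega)
    simp [this]
  omega

theorem seg_cons (P : List Char) (ps sz : Nat) (hps : ps < P.length) (hsz : 1 ≤ sz) :
    (P.drop ps).take sz = P[ps] :: (P.drop (ps + 1)).take (sz - 1) := by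
  cases sz with
  | zero => omega
  | succ n =>
    rw [List.drop_eq_getElem_cons hps, List.take_succ_cons]
    rfl

theorem dfsB_eq_transformAuxA (P I : List Char) (hlenPI : I.length = P.length) :
    ∀ (fB fA fV i j m : Nat) (stop : Option Char) (out : List Char),
      i + m ≤ P.length → j + m ≤ P.length →
      valid fV ((P.drop i).take m) ((I.drop j).take m) = true →
      (∀ c ∈ (I.drop j).take m, stop ≠ some c) →
      (j + m = P.length ∨ stop = some (I.getD (j + m) ' ')) →
      m < fB → m < fA →
      dfsB fB P I stop i j out
        = (i + m, j + m, out ++ transformAuxA fA ((P.drop i).take m) ((I.drop j).take m)) := by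
  intro fB
  induction fB with
  | zero => intro fA fV i j m stop out _ _ _ _ _ hfb _; omega
  | succ f ih =>
    intro fA fV i j m stop out hi hj hval hstop hend hfb hfa
    obtain ⟨fA', rfl⟩ : ∃ fA', fA = fA' + 1 := ⟨fA - 1, by omega⟩
    have hIlen : ((I.drop j).take m).length = m := by
      simp only [List.length_take, List.length_drop]; omega
    have hPlen : ((P.drop i).take m).length = m := by
      have := valid_length _ _ _ hval
      rw [hIlen] at this; exact this
    by_cases h0 : m = 0
    · subst h0
      have hguard : j = P.length ∨ stop = some (I.getD j ' ') := by
        simpa using hend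
      rw [dfsB, if_pos hguard]
      simp only [Nat.add_zero, List.take_zero]
      rw [transformAuxA]
      simp
    · -- m ≥ 1
      have hm1 : 1 ≤ m := by omega
      have hjlt : j < I.length := by omega
      have hilt : i < P.length := by
        simp only [List.length_take, List.length_drop] at hPlen; omega
      have hsegP := seg_cons P i m hilt hm1
      have hsegI := seg_cons I j m hjlt hm1
      -- the guard is false
      have hguard : ¬ (j = P.length ∨ stop = some (I.getD j ' ')) := by
        rintro (hje | hse)
        · omega
        · have hmem0 : I[j] ∈ (I.drop j).take m := by rw [hsegI]; exact List.mem_cons_self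
          refine hstop _ hmem0 ?_
          rw [List.getD_eq_getElem I ' ' hjlt] at hse
          exact hse
      have hrootP : P.getD i ' ' = P[i] := List.getD_eq_getElem P ' ' hilt
      simp only [dfsB, hrootP]
      rw [if_neg hguard]
      -- split the valid segment at the root
      have hinv := valid_cons_inv fV (P[i]) ((P.drop (i + 1)).take (m - 1))
        ((I.drop j).take m) (by rw [← hsegP]; exact hval)
      obtain ⟨fv, rfl, hmem, hvL, hvR⟩ := hinv
      obtain ⟨k, hjj⟩ : ∃ k, ((I.drop j).take m).idxOf (P[i]) = k := ⟨_, rfl⟩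
      rw [hjj] at hvL hvR
      have hk : k < m := by
        have := List.idxOf_lt_length_of_mem hmem
        rw [hjj, hIlen] at this; exact this
      have hIk? : ((I.drop j).take m)[k]? = some (P[i]) := by
        rw [← hjj]; exact List.getElem?_idxOf hmem
      have hIjk : I[j + k]'(by omega) = P[i] := by
        have h1 : ((I.drop j).take m)[k]? = I[j + k]? := by
          rw [List.getElem?_take_of_lt hk, List.getElem?_drop, Nat.add_comm]
        rw [h1, List.getElem?_eq_getElem (by omega)] at hIk?
        exact Option.some.inj hIk?
      -- left recursive call
      have ihL := ih fA' fv (i + 1) j k (some (P[i])) out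
        (by omega) (by omega)
        (by
          rw [List.take_take, List.take_take,
              show min k (m - 1) = k from by omega,
              show min k m = k from by omega] at hvL
          exact hvL)
        (by
          intro c hc hsome
          have hpc : P[i] = c := by injection hsome
          subst hpc
          have hnm := not_mem_take_idxOf ((I.drop j).take m) (P[i])
          rw [hjj, List.take_take, show min k m = k from by omega] at hnm
          exact hnm hc)
        (by
          right
          rw [List.getD_eq_getElem I ' ' (by omega), hIjk])
        (by omega) (by omega)
      rw [ihL]
      dsimp only
      -- right recursive call
      have ihR := ih (fA') fv (i + 1 + k) (j + k + 1) (m - 1 - k) stop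
        (out ++ transformAuxA fA' ((P.drop (i + 1)).take k) ((I.drop j).take k))
        (by omega) (by omega)
        (by
          rw [List.drop_take, List.drop_take, List.drop_drop, List.drop_drop] at hvR
          rw [show m - (k + 1) = m - 1 - k from by omega,
              show j + (k + 1) = j + k + 1 from by omega] at hvR
          exact hvR)
        (by
          intro c hc
          refine hstop c ?_
          have : c ∈ ((I.drop j).take m).drop (k + 1) := by
            rw [List.drop_take, List.drop_drop]
            rw [show m - 1 - k = m - (k + 1) from by omega,
                show j + k + 1 = j + (k + 1) from by omega] at hc
            exact hc
          exact List.mem_of_mem_drop this)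
        (by
          rw [show j + k + 1 + (m - 1 - k) = j + m from by omega]
          exact hend)
        (by omega) (by omega)
      rw [ihR]
      dsimp only
      rw [show j + k + 1 + (m - 1 - k) = j + m from by omega,
          show i + 1 + k + (m - 1 - k) = i + m from by omega]
      -- now compute the A side
      by_cases hm2 : m = 1
      · -- singleton: A takes its second base case
        subst hm2
        have hk0 : k = 0 := by omega
        subst hk0
        rw [transformAuxA,
            if_neg (by rw [hPlen, hIlen]; omega),
            if_pos (by constructor <;> [rw [hPlen]; rw [hIlen]])]
        have hLnil : transformAuxA fA' ((P.drop (i + 1)).take 0) ((I.drop j).take 0) = [] := by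
          cases fA' with
          | zero => rfl
          | succ f' => rw [transformAuxA]; simp
        have hRnil : transformAuxA fA' ((P.drop (i + 1 + 0)).take (1 - 1 - 0))
            ((I.drop (j + 0 + 1)).take (1 - 1 - 0)) = [] := by
          cases fA' with
          | zero => rfl
          | succ f' => rw [transformAuxA]; simp
        rw [hLnil, hRnil, hsegP]
        simp
      · -- m ≥ 2: A takes the recursive branch
        have hm2' : 2 ≤ m := by omega
        rw [transformAuxA,
            if_neg (by rw [hPlen, hIlen]; omega),
            if_neg (by rw [hPlen, hIlen]; omega)]
        have hroot0 : PySem.List.pyGetD ((P.drop i).take m) 0 ' ' = P[i] := by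
          rw [hsegP]; exact PySem.List.pyGetD_zero_cons _ _ _
        have hfind : PySem.Chars.find ((I.drop j).take m) [P[i]] = (k : Int) := by
          rw [find_singleton _ _ hmem, hjj]
        simp only [hroot0, hfind]
        rw [show PySem.List.slice ((P.drop i).take m) (some 1) (some ((k : Int) + 1))
              = (P.drop (i + 1)).take k from by
            rw [show ((k : Int) + 1) = ((k + 1 : Nat) : Int) from by push_cast; ring,
                show (1 : Int) = ((1 : Nat) : Int) from rfl,
                PySem.List.slice_natCast, hsegP, List.drop_succ_cons, List.drop_zero,
                show k + 1 - 1 = k from by omega, List.take_take,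
                show min k (m - 1) = k from by omega]]
        rw [show PySem.List.slice ((I.drop j).take m) none (some ((k : Int)))
              = (I.drop j).take k from by
            rw [PySem.List.slice_to_natCast, List.take_take,
                show min k m = k from by omega]]
        rw [show PySem.List.slice ((P.drop i).take m) (some ((k : Int) + 1)) none
              = (P.drop (i + 1 + k)).take (m - 1 - k) from by
            rw [show ((k : Int) + 1) = ((k + 1 : Nat) : Int) from by push_cast; ring,
                PySem.List.slice_from_natCast, hsegP, List.drop_succ_cons, List.drop_take,
                List.drop_drop]]
        rw [show PySem.List.slice ((I.drop j).take m) (some ((k : Int) + 1)) none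
              = (I.drop (j + k + 1)).take (m - 1 - k) from by
            rw [show ((k : Int) + 1) = ((k + 1 : Nat) : Int) from by push_cast; ring,
                PySem.List.slice_from_natCast, List.drop_take, List.drop_drop,
                show j + (k + 1) = j + k + 1 from by omega,
                show m - (k + 1) = m - 1 - k from by omega]]
        simp [List.append_assoc]

-- ===== VERDICT (by name: the statement is the Claim_ definition above) =====
theorem transform_spec : Claim_equal_transform := by
  intro pred inord _dom hpre
  have hval := hpre
  unfold Spec_transform transform transform_alt
  have hlen : pred.toList.length = inord.toList.length := valid_length _ _ _ hval
  have h := dfsB_eq_transformAuxA pred.toList inord.toList (by omega)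
      (pred.toList.length + 1) (pred.toList.length + 1) (inord.toList.length + 1)
      0 0 pred.toList.length none []
      (by omega) (by omega)
      (by
        simp only [List.drop_zero]
        rw [List.take_length, hlen, List.take_length]
        exact hval)
      (by intro c _ hcon; simp at hcon)
      (by left; omega)
      (by omega) (by omega)
  rw [h]
  dsimp only
  simp only [List.drop_zero, List.nil_append]
  rw [List.take_length, hlen, List.take_length]
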